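-- pv_equiv track=rewrite | github.com/DiogoBAguiar/Treinando-python | beecrowd/exercicio_1024.py | criptografar_linha
-- ===== SOURCE A (Python) =====
-- def criptografar_linha(linha):
--
--     primeira_passada = ''
--     for c in linha:
--         if c.isalpha():
--             primeira_passada += chr(ord(c) + 3)
--         else:
--             primeira_passada += c
--
--     segunda_passada = primeira_passada[::-1]
--
--     metade = len(segunda_passada) // 2
--     terceira_passada = ''
--     for i in range(len(segunda_passada)):
--         if i >= metade:
--             terceira_passada += chr(ord(segunda_passada[i]) - 1)
--         else:
--             terceira_passada += segunda_passada[i]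
--
--     return terceira_passada
-- ===== SOURCE B (Python) =====
-- def criptografar_linha(linha):
--     n = len(linha)
--     metade = n // 2
--     saida = []
--     for i in range(n):
--         c = linha[n - 1 - i]
--         d = chr(ord(c) + 3) if c.isalpha() else c
--         if i >= metade:
--             d = chr(ord(d) - 1)
--         saida.append(d)
--     return ''.join(saida)
-- ===== Notes on version B (the rewrite author's own statement) =====
-- stated objective: alternative
-- what changed: Replaces A's three sequential passes (alpha-shift string build, slice reversal, half-decrement string build) by a single index-driven loop that reads the source character at the reversed position and applies both transformations at once, collecting into a list joined at the end.
import Mathlib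
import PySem

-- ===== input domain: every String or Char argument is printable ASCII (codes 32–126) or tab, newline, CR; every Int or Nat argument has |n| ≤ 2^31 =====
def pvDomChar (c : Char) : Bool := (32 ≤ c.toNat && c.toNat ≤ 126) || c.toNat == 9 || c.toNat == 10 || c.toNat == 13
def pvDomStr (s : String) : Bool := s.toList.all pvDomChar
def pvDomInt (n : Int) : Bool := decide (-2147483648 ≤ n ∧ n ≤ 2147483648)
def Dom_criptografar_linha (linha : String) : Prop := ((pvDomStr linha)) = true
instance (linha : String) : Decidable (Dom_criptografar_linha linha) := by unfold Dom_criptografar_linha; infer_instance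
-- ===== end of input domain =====

-- B fuses A's three passes into one index-driven pass; same result on every string.

-- ===== PORT A =====
-- helper: one step of the first pass, `chr(ord(c)+3) if c.isalpha() else c`
def pvShiftA (c : Char) : Char :=
  if PySem.Chars.isalpha c then Char.ofNat (c.toNat + 3) else c

def criptografar_linha (linha : String) : String :=
  let primeira : List Char :=
    linha.toList.foldl (fun acc c => acc ++ [pvShiftA c]) []
  let segunda : List Char := (PySem.List.slice? primeira none none (-1)).getD []  -- [::-1], step literal -1 so never none
  let metade : Int := PySem.Int.floordiv (PySem.List.len segunda) 2
  let terceira : List Char :=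
    (PySem.List.pyRange 0 (PySem.List.len segunda) 1).foldl
      (fun acc i =>
        acc ++ [if metade ≤ i
                then Char.ofNat ((PySem.List.pyGetD segunda i ' ').toNat - 1)
                else PySem.List.pyGetD segunda i ' ']) []
  String.ofList terceira

-- ===== PORT B =====
def criptografar_linha_alt (linha : String) : String :=
  let s := linha.toList
  let n := s.length
  let metade := n / 2
  String.ofList <| (List.range n).map (fun i =>
    let c := s.getD (n - 1 - i) ' '
    let d := if PySem.Chars.isalpha c then Char.ofNat (c.toNat + 3) else c
    if metade ≤ i then Char.ofNat (d.toNat - 1) else d)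

-- ===== PRECONDITION & SPEC =====
def Spec_criptografar_linha (linha : String) (out : String) : Prop := out = criptografar_linha_alt linha
instance (linha : String) (out : String) : Decidable (Spec_criptografar_linha linha out) := by unfold Spec_criptografar_linha; infer_instance

-- ===== CLAIM (what is proved, stated in full; the proofs are below) =====
def Claim_equal_criptografar_linha : Prop := ∀ (linha : String), Dom_criptografar_linha linha → Spec_criptografar_linha linha (criptografar_linha linha)

-- ===== LEMMAS AND PROOFS =====
theorem pv_main (linha : String) :
    criptografar_linha linha = criptografar_linha_alt linha := by
  simp only [criptografar_linha, criptografar_linha_alt,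
    PySem.List.foldl_append_singleton_eq_map, List.nil_append,
    PySem.List.slice?_none_none_neg_one, Option.getD_some]
  set s := linha.toList with hs
  set n := s.length with hn
  have hlen : PySem.List.len ((s.map pvShiftA).reverse) = (n : Int) := by
    simp [PySem.List.len_eq, hn]
  rw [hlen, PySem.List.pyRange_zero_natCast, List.map_map]
  congr 1
  apply List.map_congr_left
  intro i hi
  have hi' : i < n := List.mem_range.mp hi
  have hrev : PySem.List.pyGetD ((s.map pvShiftA).reverse) ((i : Nat) : Int) ' '
      = pvShiftA (s.getD (n - 1 - i) ' ') := by
    rw [PySem.List.pyGetD_natCast]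
    rw [List.getD_eq_getElem _ _ (by simpa [hn] using hi'),
        List.getD_eq_getElem _ _ (by omega)]
    simp [List.getElem_reverse, hn]
  have hcast : (PySem.Int.floordiv ((n : Int)) 2 ≤ (i : Int)) ↔ (n / 2 ≤ i) := by
    rw [PySem.Int.floordiv_eq_ediv_of_pos (by norm_num)]
    constructor <;> intro h <;> [exact_mod_cast (by exact_mod_cast h : ((n:Int))/2 ≤ (i:Int)); exact_mod_cast h]
  simp only [Function.comp, hrev]
  by_cases hc : n / 2 ≤ i
  · rw [if_pos (by exact hcast.mpr hc), if_pos hc]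
    simp [pvShiftA]
  · rw [if_neg (fun h => hc (hcast.mp h)), if_neg hc]
    simp [pvShiftA]

-- ===== VERDICT (by name: the statement is the Claim_ definition above) =====
theorem criptografar_linha_spec : Claim_equal_criptografar_linha := by
  intro linha _
  exact pv_main linha
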